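-- pv_equiv track=rewrite | github.com/IceTiki/tikilib | _examples.py | nbase_generator_recursion
-- ===== SOURCE A (Python) =====
-- import typing
--
-- def nbase_generator_recursion(base: int, digit: int, endian: typing.Literal["S", "B"] = "B"):
--     """
--     n进制tuple生成器
--
--     Parameters
--     ---
--     base : int
--         基
--     digit : int
--         位
--     endian : {'S', 'B'}, optional
--         "S"代表小端序, "B"代表大端序
--
--     Yields:
--     ---
--     tuple[int, ...]
--     """
--     if digit == 0:
--         return
--     if digit == 1:
--         yield from (tuple([i]) for i in range(base))
--     else:
--         if endian == "S":
--             yield from (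
--                 tuple([j]) + i
--                 for i in nbase_generator_recursion(base, digit - 1, endian)
--                 for j in range(base)
--             )
--         elif endian == "B":
--             yield from (
--                 tuple([i]) + j
--                 for i in range(base)
--                 for j in nbase_generator_recursion(base, digit - 1, endian)
--             )
--         else:
--             raise ValueError('parameter "endian" only support value "S" or "B".')
-- ===== SOURCE B (Python) =====
-- import typing
--
-- def nbase_generator_recursion(base: int, digit: int, endian: typing.Literal["S", "B"] = "B"):
--     """Iterative odometer: keep a little-endian digit list and increment it in place."""
--     if endian not in ("S", "B"):
--         raise ValueError('parameter "endian" only support value "S" or "B".')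
--     if digit <= 0 or base <= 0:
--         # an odometer needs at least one wheel and at least one symbol on each wheel
--         return
--     t = [0] * digit
--     while True:
--         yield tuple(reversed(t)) if endian == "B" else tuple(t)
--         i = 0
--         while i < digit and t[i] == base - 1:
--             t[i] = 0
--             i += 1
--         if i == digit:
--             return
--         t[i] += 1
-- ===== Notes on version B (the rewrite author's own statement) =====
-- stated objective: alternative
-- what changed: Replaces the recursive generator (which re-runs all shorter-width sub-generators at every level) by a single iterative odometer that keeps one little-endian digit list and increments it in place with a carry scan; endian is now validated unconditionally, so Pre_ excludes invalid endian strings (where A by accident returns unvalidated output for digit <= 1) and digit < 0 (where A raises except the endian='B', base <= 0 corner).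
-- outside the precondition, e.g. on nbase_generator_recursion(3, 1, 'X'): A returns [(0,), (1,), (2,)], B raises ValueError; on nbase_generator_recursion(2, 0, 'X'): A returns [], B raises ValueError
import Mathlib
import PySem

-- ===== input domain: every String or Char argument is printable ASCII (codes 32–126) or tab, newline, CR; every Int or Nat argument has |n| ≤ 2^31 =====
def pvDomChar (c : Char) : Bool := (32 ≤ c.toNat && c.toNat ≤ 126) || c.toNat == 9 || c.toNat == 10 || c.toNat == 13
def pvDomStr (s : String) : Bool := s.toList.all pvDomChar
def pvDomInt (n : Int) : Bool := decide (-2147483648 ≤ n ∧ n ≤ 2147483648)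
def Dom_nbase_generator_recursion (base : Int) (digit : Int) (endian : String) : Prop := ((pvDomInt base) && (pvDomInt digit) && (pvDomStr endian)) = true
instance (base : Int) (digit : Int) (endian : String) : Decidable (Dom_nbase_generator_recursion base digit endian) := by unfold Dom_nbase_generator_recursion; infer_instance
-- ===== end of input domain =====

-- B replaces the recursive generator by an in-place incrementing odometer over a digit list;
-- equivalence is about the list of yielded tuples.

-- ===== PORT A =====
-- Literal port of the recursive generator; the list is the sequence of yielded tuples.
-- The `digit < 0` guard only makes the recursion total: there Python either raises
-- (RecursionError / ValueError — outside Pre_) or, for endian="B" with base ≤ 0,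
-- yields nothing, which [] matches.
def nbase_generator_recursion (base : Int) (digit : Int) (endian : String) : List (List Int) :=
  if digit = 0 then []
  else if digit = 1 then (PySem.List.pyRange 0 base 1).map (fun i => [i])
  else if digit < 0 then []
  else if endian = "S" then
    (nbase_generator_recursion base (digit - 1) endian).flatMap
      (fun i => (PySem.List.pyRange 0 base 1).map (fun j => j :: i))
  else if endian = "B" then
    (PySem.List.pyRange 0 base 1).flatMap
      (fun i => (nbase_generator_recursion base (digit - 1) endian).map (fun j => i :: j))
  else []  -- raise ValueError (outside Pre_)
termination_by digit.toNat
decreasing_by omega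

-- ===== PORT B =====
-- Source B's inner `while i < digit and t[i] == base - 1` carry scan followed by `t[i] += 1`,
-- rendered as structural recursion on the digit list t (little-endian);
-- `none` = the scan ran off the end (i == digit), i.e. the odometer is exhausted.
def pvStep (base : Int) : List Int → Option (List Int)
  | [] => none
  | x :: xs =>
    if x = base - 1 then (pvStep base xs).map (fun xs' => 0 :: xs')
    else some ((x + 1) :: xs)

-- Source B's `while True` loop: yield the current reading, then increment; fuel only makes it
-- total in Lean (it is base^digit, the exact number of iterations the Python loop performs).
def pvOdo (base : Int) (endian : String) : List Int → Nat → List (List Int)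
  | _, 0 => []
  | t, fuel + 1 =>
    (if endian = "B" then t.reverse else t) ::
      match pvStep base t with
      | none => []
      | some t' => pvOdo base endian t' fuel

def nbase_generator_recursion_alt (base : Int) (digit : Int) (endian : String) : List (List Int) :=
  if ¬(endian = "S" ∨ endian = "B") then []  -- raise ValueError (outside Pre_)
  else if digit ≤ 0 ∨ base ≤ 0 then []
  else pvOdo base endian (List.replicate digit.toNat 0) (base.toNat ^ digit.toNat)

-- ===== PRECONDITION & SPEC =====
-- Pre_ excludes (a) endian strings other than "S"/"B": A raises ValueError when digit ≥ 2
-- but, by an accident of its recursion, returns without validating when digit ≤ 1, and B's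
-- natural unconditional validation raises there; and (b) digit < 0 except the corner
-- endian = "B" ∧ base ≤ 0, where A raises (RecursionError or ValueError).
def Pre_nbase_generator_recursion (base : Int) (digit : Int) (endian : String) : Prop :=
  (endian = "S" ∨ endian = "B") ∧ (digit < 0 → endian = "B" ∧ base ≤ 0)
instance (base : Int) (digit : Int) (endian : String) : Decidable (Pre_nbase_generator_recursion base digit endian) := by unfold Pre_nbase_generator_recursion; infer_instance
def pvWitness_nbase_generator_recursion : Int × Int × String := (2, 3, "B")

def Spec_nbase_generator_recursion (base : Int) (digit : Int) (endian : String) (out : List (List Int)) : Prop := out = nbase_generator_recursion_alt base digit endian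
instance (base : Int) (digit : Int) (endian : String) (out : List (List Int)) : Decidable (Spec_nbase_generator_recursion base digit endian out) := by unfold Spec_nbase_generator_recursion; infer_instance

-- ===== CLAIM (what is proved, stated in full; the proofs are below) =====
def Claim_equal_nbase_generator_recursion : Prop := ∀ (base : Int) (digit : Int) (endian : String), Dom_nbase_generator_recursion base digit endian → Pre_nbase_generator_recursion base digit endian → Spec_nbase_generator_recursion base digit endian (nbase_generator_recursion base digit endian)

-- ===== LEMMAS AND PROOFS =====

-- Nat-level digit decoding (least-significant first), the proof-side model of the odometer state
def pvNatDecode (b m : Nat) : Nat → List Int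
  | 0 => []
  | k + 1 => ((m % b : Nat) : Int) :: pvNatDecode b (m / b) k

theorem pvFlatMap_congr {α β : Type} {l : List α} {f g : α → List β}
    (h : ∀ a ∈ l, f a = g a) : l.flatMap f = l.flatMap g := by
  induction l with
  | nil => rfl
  | cons x xs ih =>
    simp only [List.flatMap_cons]
    rw [h x (by simp), ih (fun a ha => h a (by simp [ha]))]

-- enumerating range (a*b) as the double loop: i slow, j fast
theorem pvRange_mul (b : Nat) (f : Nat → List Int) :
    ∀ a : Nat, (List.range (a * b)).map f
      = (List.range a).flatMap (fun i => (List.range b).map (fun j => f (b * i + j))) := by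
  intro a
  induction a with
  | zero => simp
  | succ a ih =>
    have : (a + 1) * b = a * b + b := by ring
    rw [this, List.range_add, List.map_append, ih, List.range_succ, List.flatMap_append]
    simp [List.map_map, Function.comp_def, Nat.mul_comm a b]

theorem pvNatDecode_low (b : Nat) (hb : 0 < b) (d n' j : Nat) (hj : j < b) :
    pvNatDecode b (b * n' + j) (d + 1) = (j : Int) :: pvNatDecode b n' d := by
  simp [pvNatDecode, Nat.mul_add_div hb, Nat.mod_eq_of_lt hj, Nat.div_eq_of_lt hj]

theorem pvNatDecode_high (b : Nat) (hb : 0 < b) :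
    ∀ (d i n' : Nat), i < b → n' < b ^ d →
      pvNatDecode b (b ^ d * i + n') (d + 1) = pvNatDecode b n' d ++ [(i : Int)] := by
  intro d
  induction d with
  | zero =>
    intro i n' hi hn'
    have hn0 : n' = 0 := by simp only [pow_zero] at hn'; omega
    subst hn0
    simp [pvNatDecode, Nat.mod_eq_of_lt hi]
  | succ d ih =>
    intro i n' hi hn'
    have hrw : b ^ (d + 1) * i + n' = b * (b ^ d * i + n' / b) + n' % b := by
      have := Nat.div_add_mod n' b
      ring_nf
      omega
    have hdivlt : n' / b < b ^ d := by
      rw [Nat.div_lt_iff_lt_mul hb]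
      calc n' < b ^ (d + 1) := hn'
        _ = b ^ d * b := by ring
    calc pvNatDecode b (b ^ (d + 1) * i + n') (d + 2)
        = pvNatDecode b (b * (b ^ d * i + n' / b) + n' % b) (d + 2) := by rw [hrw]
      _ = ((n' % b : Nat) : Int) :: pvNatDecode b (b ^ d * i + n' / b) (d + 1) := by
          have := Nat.mod_lt n' hb
          rw [pvNatDecode_low b hb (d + 1) _ _ this]
      _ = ((n' % b : Nat) : Int) :: (pvNatDecode b (n' / b) d ++ [(i : Int)]) := by
          rw [ih i (n' / b) hi hdivlt]
      _ = pvNatDecode b n' (d + 1) ++ [(i : Int)] := by simp [pvNatDecode]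

-- closed form of port A on positive base, positive digit, valid endian (any endian if digit = 1)
theorem pvA_eval (b : Nat) (hb : 0 < b) :
    ∀ (d : Nat), 1 ≤ d → ∀ (e : String), (d = 1 ∨ e = "S" ∨ e = "B") →
      nbase_generator_recursion (b : Int) (d : Int) e
        = (List.range (b ^ d)).map
            (fun n => if e = "B" then (pvNatDecode b n d).reverse else pvNatDecode b n d) := by
  intro d
  induction d with
  | zero => omega
  | succ d ih =>
    intro _ e hok
    rcases Nat.eq_zero_or_pos d with h0 | hdpos
    · subst h0
      rw [nbase_generator_recursion]
      norm_num [PySem.List.pyRange_zero_nat b, List.map_map]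
      intro n hn
      simp [pvNatDecode, Nat.mod_eq_of_lt hn]
    · have he : e = "S" ∨ e = "B" := by
        rcases hok with h | h
        · omega
        · exact h
      have hcast : ((d : Int) + 1) - 1 = (d : Int) := by ring
      have hrec := ih hdpos e (Or.inr he)
      rcases he with he | he
      · subst he
        rw [nbase_generator_recursion]
        have h2 : ¬((d : Int) + 1 = 0) := by omega
        have h3 : ¬((d : Int) + 1 = 1) := by omega
        have h4 : ¬((d : Int) + 1 < 0) := by omega
        push_cast
        simp only [h2, h3, h4, if_false, hcast, hrec]
        rw [PySem.List.pyRange_zero_nat b]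
        simp only [if_neg (by decide : ¬("S" = "B"))]
        have hpow : b ^ (d + 1) = b ^ d * b := by ring
        rw [hpow, pvRange_mul b _ (b ^ d), List.flatMap_map]
        refine pvFlatMap_congr (fun n' hn' => ?_)
        rw [List.map_map]
        refine List.map_congr_left (fun j hj => ?_)
        rw [List.mem_range] at hj
        simp [pvNatDecode_low b hb d n' j hj]
      · subst he
        rw [nbase_generator_recursion]
        have h2 : ¬((d : Int) + 1 = 0) := by omega
        have h3 : ¬((d : Int) + 1 = 1) := by omega
        have h4 : ¬((d : Int) + 1 < 0) := by omega
        push_cast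
        simp only [h2, h3, h4, if_false, hcast, hrec]
        rw [PySem.List.pyRange_zero_nat b]
        have hpow : b ^ (d + 1) = b * b ^ d := by ring
        rw [hpow, pvRange_mul (b ^ d) _ b, List.flatMap_map]
        refine pvFlatMap_congr (fun i hi => ?_)
        rw [List.mem_range] at hi
        rw [List.map_map]
        refine List.map_congr_left (fun n' hn' => ?_)
        rw [List.mem_range] at hn'
        simp [pvNatDecode_high b hb d i n' hi hn']

-- port A yields nothing when base ≤ 0 (for any digit and endian)
theorem pvA_nonpos (base : Int) (hb : base ≤ 0) (digit : Int) (e : String) :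
    nbase_generator_recursion base digit e = [] := by
  rw [nbase_generator_recursion]
  have hnil : PySem.List.pyRange 0 base 1 = [] := by
    rw [PySem.List.pyRange_zero]
    simp [Int.toNat_of_nonpos hb]
  split_ifs <;> simp [hnil]

-- the odometer's initial state is the little-endian decoding of 0
theorem pvNatDecode_zero (b : Nat) : ∀ d, pvNatDecode b 0 d = List.replicate d 0 := by
  intro d
  induction d with
  | zero => rfl
  | succ d ih => simp [pvNatDecode, ih, List.replicate_succ]

-- incrementing decode(n) succeeds (giving decode(n+1)) iff n+1 < b^d
theorem pvStep_decode (b : Nat) (hb : 0 < b) :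
    ∀ (d n : Nat), n < b ^ d →
      pvStep (b : Int) (pvNatDecode b n d)
        = if n + 1 < b ^ d then some (pvNatDecode b (n + 1) d) else none := by
  intro d
  induction d with
  | zero =>
    intro n hn
    simp only [pow_zero] at hn ⊢
    have : n = 0 := by omega
    subst this
    simp [pvNatDecode, pvStep]
  | succ d ih =>
    intro n hn
    have hmod : n % b < b := Nat.mod_lt n hb
    have hdiv : n / b < b ^ d := by
      rw [Nat.div_lt_iff_lt_mul hb]
      calc n < b ^ (d + 1) := hn
        _ = b ^ d * b := by ring
    simp only [pvNatDecode, pvStep]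
    by_cases hc : ((n % b : Nat) : Int) = (b : Int) - 1
    · have hmax : n % b = b - 1 := by omega
      rw [if_pos hc, ih (n / b) hdiv]
      have h1 : n + 1 = b * (n / b + 1) := by
        have h2 : b * (n / b + 1) = b * (n / b) + b := by ring
        have := Nat.div_add_mod n b
        omega
      have hsucc_div : (n + 1) / b = n / b + 1 := by
        rw [h1, Nat.mul_div_cancel_left _ hb]
      have hsucc_mod : (n + 1) % b = 0 := by
        rw [h1, Nat.mul_mod_right]
      have hp : b ^ (d + 1) = b * b ^ d := by ring
      have hiff : n + 1 < b ^ (d + 1) ↔ n / b + 1 < b ^ d := by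
        rw [h1, hp, Nat.mul_lt_mul_left hb]
      by_cases hlt : n / b + 1 < b ^ d
      · rw [if_pos hlt, if_pos (hiff.mpr hlt)]
        simp only [Option.map_some, hsucc_div, hsucc_mod]
        norm_num
      · rw [if_neg hlt, if_neg (fun h => hlt (hiff.mp h))]
        rfl
    · have hne : n % b ≠ b - 1 := by omega
      have hlt2 : n % b + 1 < b := by omega
      rw [if_neg hc]
      have hsucc_div : (n + 1) / b = n / b := by
        have := Nat.div_add_mod n b
        have h1 : n + 1 = b * (n / b) + (n % b + 1) := by omega
        rw [h1, Nat.mul_add_div hb, Nat.div_eq_of_lt hlt2]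
        omega
      have hsucc_mod : (n + 1) % b = n % b + 1 := by
        have h1 : n + 1 = b * (n / b) + (n % b + 1) := by
          have := Nat.div_add_mod n b
          omega
        rw [h1, Nat.mul_add_mod, Nat.mod_eq_of_lt hlt2]
      have hlt3 : n + 1 < b ^ (d + 1) := by
        have h1 : n = b * (n / b) + n % b := by
          have := Nat.div_add_mod n b
          omega
        have h2 : b * (n / b) + b ≤ b * b ^ d := by
          have : n / b + 1 ≤ b ^ d := hdiv
          calc b * (n / b) + b = b * (n / b + 1) := by ring
            _ ≤ b * b ^ d := Nat.mul_le_mul_left b this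
        have hp : b ^ (d + 1) = b * b ^ d := by ring
        omega
      rw [if_pos hlt3]
      simp only [hsucc_div, hsucc_mod]
      norm_num

-- running the odometer for k more ticks from decode(n), n + k = b^d, yields decode of n..b^d-1
theorem pvOdo_decode (b : Nat) (hb : 0 < b) (d : Nat) (e : String) :
    ∀ (k n : Nat), n + k = b ^ d →
      pvOdo (b : Int) e (pvNatDecode b n d) k
        = (List.range' n k).map
            (fun m => if e = "B" then (pvNatDecode b m d).reverse else pvNatDecode b m d) := by
  intro k
  induction k with
  | zero => intro n _; rfl
  | succ k ih =>
    intro n hnk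
    have hn : n < b ^ d := by omega
    rw [pvOdo, pvStep_decode b hb d n hn]
    rcases Nat.eq_zero_or_pos k with hk0 | hkpos
    · subst hk0
      rw [if_neg (show ¬(n + 1 < b ^ d) by omega)]
      rfl
    · rw [if_pos (show n + 1 < b ^ d by omega)]
      have hrec := ih (n + 1) (by omega)
      simp only [List.range'_succ, List.map_cons]
      exact congrArg (List.cons _) hrec

-- ===== VERDICT (by name: the statement is the Claim_ definition above) =====
theorem nbase_generator_recursion_spec : Claim_equal_nbase_generator_recursion := by
  intro base digit endian _ hpre
  unfold Spec_nbase_generator_recursion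
  obtain ⟨hend, hneg⟩ := hpre
  have hendn : ¬¬(endian = "S" ∨ endian = "B") := not_not_intro hend
  by_cases hd0 : digit ≤ 0
  · rw [nbase_generator_recursion_alt, if_neg hendn, if_pos (Or.inl hd0)]
    by_cases h0 : digit = 0
    · subst h0; rw [nbase_generator_recursion]; simp
    · exact pvA_nonpos base (hneg (by omega)).2 digit endian
  · replace hd0 : 0 < digit := by omega
    by_cases hb : base ≤ 0
    · rw [nbase_generator_recursion_alt, if_neg hendn, if_pos (Or.inr hb)]
      exact pvA_nonpos base hb digit endian
    · have hbpos : 0 < base := by omega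
      rw [nbase_generator_recursion_alt, if_neg hendn, if_neg (by omega)]
      have hbc : base = ((base.toNat : Nat) : Int) := by omega
      have hdc : digit = ((digit.toNat : Nat) : Int) := by omega
      rw [hbc, hdc, pvA_eval base.toNat (by omega) digit.toNat (by omega) endian (Or.inr hend)]
      simp only [Int.toNat_natCast]
      rw [← pvNatDecode_zero base.toNat digit.toNat,
        pvOdo_decode base.toNat (by omega) digit.toNat endian (base.toNat ^ digit.toNat) 0 (by omega)]
      rw [List.range_eq_range']
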